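-- pv_equiv track=rewrite | github.com/IzhykOleh/codewars-solutions | Finite State Machine.py | read_commands
-- ===== SOURCE A (Python) =====
-- class State:
--     def __init__(self, initial_state):
--         self.state = initial_state
--     def __call__(self, new_state):
--         self.state = new_state
--     @property
--     def get_state(self):
--         return self.state
--
-- def read_commands(commands):
--     # Return True if we end in our accept state, False otherwise
--     state = State('q1')
--     for com in commands:
--         current_state = state.get_state
--         if com == '1':
--             if current_state == 'q1':
--                 state('q2')
--             elif current_state == 'q2':
--                 pass
--             elif current_state == 'q3':
--                 state('q2')
--         elif com == '0':
--             if current_state == 'q1':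
--                 pass
--             elif current_state == 'q2':
--                 state('q3')
--             elif current_state == 'q3':
--                 state('q2')
--     return True if state.get_state == 'q2' else False
-- ===== SOURCE B (Python) =====
-- def read_commands(commands):
--     # Any '1' forces state q2; each later '0' toggles q2<->q3; other chars do nothing.
--     # So scan from the right: count '0's until the last '1'; accept iff that count is even.
--     zeros = 0
--     for c in reversed(commands):
--         if c == '1':
--             return zeros % 2 == 0
--         if c == '0':
--             zeros += 1
--     return False
-- ===== Notes on version B (the rewrite author's own statement) =====
-- stated objective: simpler
-- what changed: Replaces the three-state step-by-step FSM simulation with a single reverse scan that counts '0' characters after the last '1' and accepts iff that count is even (False when there is no '1').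
import Mathlib
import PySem

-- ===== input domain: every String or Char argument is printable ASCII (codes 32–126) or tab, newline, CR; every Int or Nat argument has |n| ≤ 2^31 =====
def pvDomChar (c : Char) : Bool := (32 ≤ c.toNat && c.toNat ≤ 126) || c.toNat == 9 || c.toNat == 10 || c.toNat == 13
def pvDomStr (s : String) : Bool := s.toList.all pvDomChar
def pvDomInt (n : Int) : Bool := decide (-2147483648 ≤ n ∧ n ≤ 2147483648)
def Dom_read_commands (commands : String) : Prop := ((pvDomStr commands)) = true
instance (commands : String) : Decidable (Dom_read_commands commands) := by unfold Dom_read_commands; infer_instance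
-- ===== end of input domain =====

-- B replaces the step-by-step three-state simulation by a single reverse scan counting
-- '0's after the last '1' (accept iff that count is even); objective: simpler.

-- ===== PORT A =====
-- one FSM step of A's loop body (state is the string A's State object holds)
def pvStep (state : String) (com : Char) : String :=
  if com = '1' then
    if state = "q1" then "q2"
    else if state = "q2" then state
    else if state = "q3" then "q2"
    else state
  else if com = '0' then
    if state = "q1" then state
    else if state = "q2" then "q3"
    else if state = "q3" then "q2"
    else state
  else state

def read_commands (commands : String) : Bool :=
  let final := commands.toList.foldl pvStep "q1"
  if final = "q2" then true else false

-- ===== PORT B =====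
-- reverse scan: count '0's until the first '1' seen from the right
def pvAltGo : List Char → Nat → Bool
  | [], _ => false
  | c :: rest, zeros =>
    if c = '1' then zeros % 2 == 0
    else pvAltGo rest (if c = '0' then zeros + 1 else zeros)

def read_commands_alt (commands : String) : Bool :=
  pvAltGo commands.toList.reverse 0

-- ===== PRECONDITION & SPEC =====
def Spec_read_commands (commands : String) (out : Bool) : Prop := out = read_commands_alt commands
instance (commands : String) (out : Bool) : Decidable (Spec_read_commands commands out) := by unfold Spec_read_commands; infer_instance

-- ===== CLAIM (what is proved, stated in full; the proofs are below) =====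
def Claim_equal_read_commands : Prop := ∀ (commands : String), Dom_read_commands commands → Spec_read_commands commands (read_commands commands)

-- ===== LEMMAS AND PROOFS =====

-- applying k further '0'-steps to a state
def pvToggle (s : String) : String :=
  if s = "q2" then "q3" else if s = "q3" then "q2" else s

def pvApplyZ : Nat → String → String
  | 0, s => s
  | k + 1, s => pvApplyZ k (pvToggle s)

def pvStOk (s : String) : Prop := s = "q1" ∨ s = "q2" ∨ s = "q3"

theorem pvStep_ok (s : String) (c : Char) (h : pvStOk s) : pvStOk (pvStep s c) := by
  rcases h with h | h | h <;> subst h <;> unfold pvStep <;> split_ifs <;> simp [pvStOk]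

theorem pvStOk_foldl (l : List Char) (s : String) (h : pvStOk s) :
    pvStOk (l.foldl pvStep s) := by
  induction l generalizing s with
  | nil => exact h
  | cons c rest ih => exact ih _ (pvStep_ok s c h)

theorem pvApplyZ_q1 (k : Nat) : pvApplyZ k "q1" = "q1" := by
  induction k with
  | zero => rfl
  | succ n ih => simpa [pvApplyZ, pvToggle] using ih

theorem pvApplyZ_q2q3 (k : Nat) :
    pvApplyZ k "q2" = (if k % 2 = 0 then "q2" else "q3") ∧
    pvApplyZ k "q3" = (if k % 2 = 0 then "q3" else "q2") := by
  induction k with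
  | zero => simp [pvApplyZ]
  | succ n ih =>
    have h2 := ih.1; have h3 := ih.2
    constructor <;> simp only [pvApplyZ, pvToggle] <;>
      rcases Nat.mod_two_eq_zero_or_one n with h | h <;>
        simp [h2, h3, h, Nat.succ_mod_two_eq_zero_iff]

theorem pvMain (r : List Char) (k : Nat) :
    pvAltGo r k = decide (pvApplyZ k (r.reverse.foldl pvStep "q1") = "q2") := by
  induction r generalizing k with
  | nil => simp [pvAltGo, pvApplyZ_q1]
  | cons c rest ih =>
    have hs : pvStOk (rest.reverse.foldl pvStep "q1") :=
      pvStOk_foldl _ _ (Or.inl rfl)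
    simp only [pvAltGo, List.reverse_cons, List.foldl_append, List.foldl_cons, List.foldl_nil]
    by_cases h1 : c = '1'
    · subst h1
      have hstep : pvStep (rest.reverse.foldl pvStep "q1") '1' = "q2" := by
        rcases hs with h | h | h <;> rw [h] <;> rfl
      rw [hstep]
      simp [(pvApplyZ_q2q3 k).1]
      rcases Nat.mod_two_eq_zero_or_one k with h | h <;> simp [h]
    · by_cases h0 : c = '0'
      · subst h0
        have hstep : pvStep (rest.reverse.foldl pvStep "q1") '0' =
            pvToggle (rest.reverse.foldl pvStep "q1") := by
          rcases hs with h | h | h <;> rw [h] <;> rfl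
        rw [hstep, show pvApplyZ k (pvToggle (List.foldl pvStep "q1" rest.reverse)) =
              pvApplyZ (k + 1) (List.foldl pvStep "q1" rest.reverse) from rfl]
        simpa using ih (k + 1)
      · have hstep : pvStep (rest.reverse.foldl pvStep "q1") c =
            rest.reverse.foldl pvStep "q1" := by
          simp [pvStep, h0, h1]
        rw [hstep, if_neg h1, if_neg h0, ih k]

-- ===== VERDICT (by name: the statement is the Claim_ definition above) =====
theorem read_commands_spec : Claim_equal_read_commands := by
  intro commands _
  unfold Spec_read_commands read_commands read_commands_alt
  rw [pvMain]
  simp [pvApplyZ]
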